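-- pv_equiv track=rewrite | github.com/Romanweiss/2gis_parser | parser_2gis/webui.py | find_top_group_id
-- ===== SOURCE A (Python) =====
-- from typing import Any
--
-- def find_top_group_id(rubrics: dict[str, dict[str, Any]], node_id: str) -> str:
--     current_id = node_id
--     while True:
--         node = rubrics[current_id]
--         parent_id = node['parentCode']
--         if parent_id == '0':
--             return current_id
--         current_id = parent_id
-- ===== SOURCE B (Python) =====
-- def find_top_group_id(rubrics, node_id):
--     node = rubrics[node_id]
--     parent_id = node['parentCode']
--     if parent_id == '0':
--         return node_id
--     rest = {k: v for k, v in rubrics.items() if k != node_id}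
--     return find_top_group_id(rest, parent_id)
-- ===== Notes on version B (the rewrite author's own statement) =====
-- stated objective: alternative
-- what changed: A's while-loop over a mutable current_id is replaced by structural recursion on the rubric dict itself: B removes the visited entry before recursing on the parent id, so the recursion descends on a strictly shrinking dict (and a cyclic chain, on which A loops forever, fails fast in B).
import Mathlib
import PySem

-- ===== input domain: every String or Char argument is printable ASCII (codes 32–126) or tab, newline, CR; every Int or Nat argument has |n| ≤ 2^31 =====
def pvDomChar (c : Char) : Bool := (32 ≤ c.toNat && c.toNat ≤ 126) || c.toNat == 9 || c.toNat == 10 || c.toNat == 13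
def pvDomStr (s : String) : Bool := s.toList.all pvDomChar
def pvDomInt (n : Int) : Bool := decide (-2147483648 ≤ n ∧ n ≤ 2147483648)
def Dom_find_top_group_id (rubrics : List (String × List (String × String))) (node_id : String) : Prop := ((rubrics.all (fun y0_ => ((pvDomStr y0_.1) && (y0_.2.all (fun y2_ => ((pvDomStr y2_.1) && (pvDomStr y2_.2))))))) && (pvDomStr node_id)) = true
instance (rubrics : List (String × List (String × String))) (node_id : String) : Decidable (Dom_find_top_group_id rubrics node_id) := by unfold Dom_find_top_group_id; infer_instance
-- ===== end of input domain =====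

-- B replaces A's while-loop over a mutable current_id by structural recursion on the rubric
-- dict itself, removing each visited entry before recursing (same return value wherever A returns;
-- objective: alternative decomposition, no speed claim).

-- ===== PORT A =====
-- A's 'while True' loop; fuel rubrics.length+1 suffices on every input where the Python A
-- returns (a returning run visits pairwise-distinct keys), which is exactly Pre_ below.
-- On other inputs (KeyError / infinite loop in Python) nothing is claimed.
def pvGoA (rubrics : List (String × List (String × String))) : Nat → String → String
  | 0, current_id => current_id
  | fuel + 1, current_id =>
    match List.lookup current_id rubrics with
    | none => current_id                     -- KeyError in Python: outside Pre_
    | some node =>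
      match List.lookup "parentCode" node with
      | none => current_id                   -- KeyError in Python: outside Pre_
      | some parent_id =>
        if parent_id = "0" then current_id else pvGoA rubrics fuel parent_id

def find_top_group_id (rubrics : List (String × List (String × String))) (node_id : String) : String :=
  pvGoA rubrics (rubrics.length + 1) node_id

-- used only by the termination argument of find_top_group_id_alt (cited in decreasing_by)
theorem pvLookupMem {β : Type} : ∀ (l : List (String × β)) (k : String) (v : β),
    List.lookup k l = some v → (k, v) ∈ l := by
  intro l
  induction l with
  | nil => intro k v h; simp [List.lookup] at h
  | cons a t ih =>
    intro k v h
    rw [List.lookup] at h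
    by_cases hk : k = a.1
    · simp [hk] at h
      subst h hk
      exact List.mem_cons_self
    · have : (k == a.1) = false := by simp [hk]
      rw [this] at h
      exact List.mem_cons_of_mem _ (ih k v h)

-- ===== PORT B =====
def find_top_group_id_alt (rubrics : List (String × List (String × String))) (node_id : String) : String :=
  match h : List.lookup node_id rubrics with
  | none => node_id                          -- KeyError in Python: outside Pre_
  | some node =>
    match List.lookup "parentCode" node with
    | none => node_id                        -- KeyError in Python: outside Pre_
    | some parent_id =>
      if parent_id = "0" then node_id
      else find_top_group_id_alt (rubrics.filter (fun kv => kv.1 ≠ node_id)) parent_id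
termination_by rubrics.length
decreasing_by
  simp only [List.length_unattach]
  have h1 : (List.filter (fun (x : {x // x ∈ rubrics}) => decide (x.val.1 ≠ node_id)) rubrics.attach).length < rubrics.attach.length :=
    List.length_filter_lt_length_iff_exists.mpr
      ⟨⟨(node_id, node), pvLookupMem rubrics node_id node h⟩, List.mem_attach _ _, by simp⟩
  simpa using h1

-- ===== PRECONDITION & SPEC =====
-- Pre_: node_id's parent chain is defined (every id on it is a key, with a 'parentCode' field)
-- and reaches '0' through pairwise-distinct keys — exactly the inputs on which the Python A
-- returns (elsewhere A raises KeyError or loops forever; Pre_ excludes nothing A returns on).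
-- Reachability through a pointer structure has no recursion-free closed form; pvChainOk states it
-- as a predicate over the SET of not-yet-visited keys (neither port computes with such a set):
-- each step may only use a key not used before, which is precisely the acyclic-chain invariant.
-- The first Nat argument is always the size of the key set; it only makes the recursion structural.
def pvChainOk (rubrics : List (String × List (String × String))) : Nat → List String → String → Bool
  | 0, _, _ => false
  | gas + 1, avail, cur =>
    if cur ∈ avail then
      match List.lookup cur rubrics with
      | none => false
      | some node =>
        match List.lookup "parentCode" node with
        | none => false
        | some p => if p = "0" then true else pvChainOk rubrics gas (avail.erase cur) p
    else false

def Pre_find_top_group_id (rubrics : List (String × List (String × String))) (node_id : String) : Prop :=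
  pvChainOk rubrics ((rubrics.map Prod.fst).dedup).length ((rubrics.map Prod.fst).dedup) node_id = true

instance (rubrics : List (String × List (String × String))) (node_id : String) : Decidable (Pre_find_top_group_id rubrics node_id) := by
  unfold Pre_find_top_group_id; infer_instance

def pvWitness_find_top_group_id : (List (String × List (String × String))) × String :=
  ([("1", [("parentCode", "0")]), ("2", [("parentCode", "1")])], "2")

def Spec_find_top_group_id (rubrics : List (String × List (String × String))) (node_id : String) (out : String) : Prop := out = find_top_group_id_alt rubrics node_id
instance (rubrics : List (String × List (String × String))) (node_id : String) (out : String) : Decidable (Spec_find_top_group_id rubrics node_id out) := by unfold Spec_find_top_group_id; infer_instance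

-- ===== CLAIM (what is proved, stated in full; the proofs are below) =====
def Claim_equal_find_top_group_id : Prop := ∀ (rubrics : List (String × List (String × String))) (node_id : String), Dom_find_top_group_id rubrics node_id → Pre_find_top_group_id rubrics node_id → Spec_find_top_group_id rubrics node_id (find_top_group_id rubrics node_id)

-- ===== LEMMAS AND PROOFS =====

-- first-match lookup ignores entries whose key is filtered away, for any other key
lemma lookup_filter_ne {β : Type} (c k : String) (hk : k ≠ c) :
    ∀ (l : List (String × β)), List.lookup k (l.filter (fun kv => kv.1 ≠ c)) = List.lookup k l := by
  intro l
  induction l with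
  | nil => rfl
  | cons a t ih =>
    simp only [ne_eq, decide_not] at ih
    rw [List.filter_cons]
    by_cases ha : a.1 = c
    · have h3 : (k == c) = false := by simp [hk]
      simp [ha, List.lookup, h3, ih]
    · simp [ha, List.lookup, ih]

-- core invariant: while sub agrees with rubrics on the not-yet-visited keys and the chain from
-- cur is good w.r.t. those keys, A's fueled loop and B's shrinking recursion return the same id
lemma pvGoA_eq_alt (gas : Nat) :
    ∀ (fuel : Nat) (avail : List String) (sub rubrics : List (String × List (String × String))) (cur : String),
    avail.Nodup →
    (∀ k, k ∈ avail → List.lookup k sub = List.lookup k rubrics) →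
    pvChainOk rubrics gas avail cur = true →
    gas ≤ fuel →
    pvGoA rubrics fuel cur = find_top_group_id_alt sub cur := by
  induction gas with
  | zero => intro fuel avail _ _ _ _ _ hok _; simp [pvChainOk] at hok
  | succ gas ih =>
    intro fuel avail sub rubrics cur hnd hagree hok hf
    obtain ⟨f, rfl⟩ : ∃ f, fuel = f + 1 := ⟨fuel - 1, by omega⟩
    rw [pvChainOk] at hok
    by_cases hmem : cur ∈ avail
    · rw [if_pos hmem] at hok
      split at hok
      next hr => exact absurd hok (by simp)
      next node hr =>
        split at hok
        next hp => exact absurd hok (by simp)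
        next p hp =>
          have hs : List.lookup cur sub = some node := (hagree cur hmem).trans hr
          rw [pvGoA]
          simp only [hr, hp]
          rw [find_top_group_id_alt.eq_def]
          by_cases h0 : p = "0"
          · rw [if_pos h0]
            split
            next h2 => simp [hs] at h2
            next node2 h2 =>
              rw [hs] at h2
              injection h2 with e
              subst e
              simp [hp, h0]
          · rw [if_neg h0]
            rw [if_neg h0] at hok
            split
            next h2 => simp [hs] at h2
            next node2 h2 =>
              rw [hs] at h2
              injection h2 with e
              subst e
              simp only [hp, if_neg h0]
              apply ih f (avail.erase cur) _ rubrics p (hnd.erase cur)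
              · intro k hk
                have hk' := (List.Nodup.mem_erase_iff hnd).mp hk
                rw [lookup_filter_ne cur k hk'.1 sub]
                exact hagree k hk'.2
              · exact hok
              · omega
    · simp [hmem] at hok

-- ===== VERDICT (by name: the statement is the Claim_ definition above) =====
theorem find_top_group_id_spec : Claim_equal_find_top_group_id := by
  intro rubrics node_id _ hpre
  unfold Spec_find_top_group_id find_top_group_id
  apply pvGoA_eq_alt ((rubrics.map Prod.fst).dedup).length (rubrics.length + 1)
    ((rubrics.map Prod.fst).dedup) rubrics rubrics node_id
    (List.nodup_dedup _) (fun _ _ => rfl) hpre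
  have h1 : ((rubrics.map Prod.fst).dedup).length ≤ (rubrics.map Prod.fst).length :=
    (List.dedup_sublist _).length_le
  have h2 : (rubrics.map Prod.fst).length = rubrics.length := List.length_map ..
  omega
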